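-- pv_equiv track=rewrite | github.com/Oumaimamam/edan55 | maxcut/maxcut.py | greedy_swapping_max_cut
-- ===== SOURCE A (Python) =====
-- def calculate_initial_cut_weight(edges, A):
--     """Calculates the initial weight of the cut based on set A."""
--     cut_weight = 0
--     for v1, v2, weight in edges:
--         if (v1 in A and v2 not in A) or (v1 not in A and v2 in A):
--             cut_weight += int(weight)
--     return cut_weight
--
-- def greedy_swapping_max_cut(edges):
--     """greedy swapping max cut algorithm"""
--     vertices = {v for edge in edges for v in edge[:2]}
--     A = set()
--     max_cut_weight = calculate_initial_cut_weight(edges, A)  # Initial cut weight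
--
--     improvement = True
--     while improvement:
--         improvement = False
--         for v in vertices:
--             new_A = A.symmetric_difference({v})  # Create a new set that is A with v swapped
--             new_cut_weight = calculate_initial_cut_weight(edges, new_A)
--             if new_cut_weight > max_cut_weight:
--                 max_cut_weight = new_cut_weight
--                 A = new_A
--                 improvement = True
--                 break  # Found an improvement, break and start looking for the next improvement
--     return max_cut_weight
-- ===== SOURCE B (Python) =====
-- def greedy_swapping_max_cut(edges):
--     """Greedy swapping max cut: same local search, but each candidate flip is
--     evaluated in O(deg v) via a precomputed incidence list instead of a full
--     O(E) cut recomputation, and the cut weight is maintained incrementally."""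
--     vertices = {v for edge in edges for v in edge[:2]}
--     order = list(vertices)
--     inc = {v: [] for v in order}
--     for v1, v2, w in edges:
--         w = int(w)
--         inc[v1].append((v2, w))
--         inc[v2].append((v1, w))
--     in_A = {v: False for v in order}
--     cut = 0
--     improved = True
--     while improved:
--         improved = False
--         for v in order:
--             side = in_A[v]
--             gain = 0
--             for u, w in inc[v]:
--                 if u == v:
--                     continue
--                 gain += w if in_A[u] == side else -w
--             if gain > 0:
--                 cut += gain
--                 in_A[v] = not side
--                 improved = True
--                 break
--     return cut
-- ===== Notes on version B (the rewrite author's own statement) =====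
-- stated objective: faster
-- what changed: B precomputes an incidence list per vertex and evaluates each candidate flip by its incident-edge gain in O(deg v), maintaining the cut weight incrementally, instead of rebuilding the flipped set and recomputing the whole cut over all edges for every candidate.
import Mathlib
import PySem

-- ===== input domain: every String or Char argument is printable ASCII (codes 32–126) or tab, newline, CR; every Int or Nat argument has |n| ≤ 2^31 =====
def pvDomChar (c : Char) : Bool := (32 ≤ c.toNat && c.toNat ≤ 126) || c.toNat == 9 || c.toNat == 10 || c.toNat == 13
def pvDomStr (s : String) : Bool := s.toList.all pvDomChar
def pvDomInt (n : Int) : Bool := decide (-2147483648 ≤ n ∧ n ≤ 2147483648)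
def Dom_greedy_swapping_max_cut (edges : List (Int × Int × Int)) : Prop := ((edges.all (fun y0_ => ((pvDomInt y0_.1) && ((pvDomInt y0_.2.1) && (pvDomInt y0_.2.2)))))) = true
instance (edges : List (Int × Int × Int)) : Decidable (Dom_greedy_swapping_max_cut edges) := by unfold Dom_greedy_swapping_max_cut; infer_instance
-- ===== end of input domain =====

-- B replaces A's full O(E) cut recomputation per candidate flip by an O(deg v) incident-edge
-- gain over a precomputed incidence list, maintaining the cut weight incrementally (faster).

-- ===== PORT A =====
-- A iterates 'for v in vertices' over a Python SET with 'break', so CPython's hash-table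
-- iteration order is observable. PySem does not model set iteration order, so the helpers
-- below are a hand port, step for step, of CPython's set for int keys (open addressing,
-- table size 8, LINEAR_PROBES = 9, PERTURB_SHIFT = 5, resize at fill*5 >= mask*3 to
-- used*4): exact for |n| ≤ 2^31, where hash(n) = n except hash(-1) = -2.
-- Both Pythons build the identical set, so both ports share this order helper.
def pvHash (n : Int) : Int := if n = -1 then -2 else n

-- scan 'count'+1 consecutive slots from j: some (some j') = free slot, some none = key present, none = not found
def pvScanSlots (t : Array (Option Int)) (key : Int) : Nat → Nat → Option (Option Nat)
  | j, count =>
    match t.getD j none with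
    | none => some (some j)
    | some k =>
      if k = key then some none
      else match count with
           | 0 => none
           | c+1 => pvScanSlots t key (j+1) c

-- CPython set_add_entry/set_insert_clean probe sequence; fuel only makes it total
-- (size+64 probes always suffice: the perturbed LCG reaches a free slot, the table is never full)
def pvFindSlot (t : Array (Option Int)) (size : Nat) (key : Int) : Nat → Nat → Nat → Option Nat
  | _, _, 0 => none
  | i, perturb, fuel+1 =>
    let probes := if i + 9 ≤ size - 1 then 9 else 0
    match pvScanSlots t key i probes with
    | some r => r
    | none =>
      let p2 := perturb >>> 5
      pvFindSlot t size key ((i*5+1+p2) % size) p2 fuel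

-- initial probe index (size_t)hash & mask and initial perturb (hash as unsigned 64-bit)
def pvSlotArgs (size : Nat) (key : Int) : Nat × Nat :=
  (((pvHash key).emod size).toNat, ((pvHash key).emod 18446744073709551616).toNat)

-- set_table_resize's 'newsize = 8; while newsize <= minused: newsize <<= 1' (fuel 64 covers any Nat here)
def pvGrow (minused : Nat) : Nat → Nat → Nat
  | 0, cur => cur
  | f+1, cur => if cur ≤ minused then pvGrow minused f (cur*2) else cur

def pvReinsert (keys : List Int) (size : Nat) : Array (Option Int) :=
  keys.foldl (fun t k =>
    match pvFindSlot t size k (pvSlotArgs size k).1 (pvSlotArgs size k).2 (size+64) with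
    | some j => t.setIfInBounds j (some k)
    | none => t) (Array.replicate size none)

-- state = (table, size, fill); used = fill (this set never discards)
def pvSetAdd (st : Array (Option Int) × Nat × Nat) (key : Int) : Array (Option Int) × Nat × Nat :=
  match pvFindSlot st.1 st.2.1 key (pvSlotArgs st.2.1 key).1 (pvSlotArgs st.2.1 key).2 (st.2.1+64) with
  | none => st
  | some j =>
    let t := st.1.setIfInBounds j (some key)
    let fill := st.2.2 + 1
    if fill*5 ≥ (st.2.1-1)*3 then
      let newsize := pvGrow (fill*4) 64 8
      (pvReinsert (t.toList.filterMap id) newsize, newsize, fill)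
    else (t, st.2.1, fill)

-- iteration order of the finished CPython set {x for x in xs}
def pySetOrder (xs : List Int) : List Int :=
  ((xs.foldl pvSetAdd (Array.replicate 8 none, 8, 0)).1).toList.filterMap id

-- calculate_initial_cut_weight(edges, A)
def pvCutW (edges : List (Int × Int × Int)) (A : PySem.Set Int) : Int :=
  edges.foldl (fun acc e =>
    if (PySem.Set.contains A e.1 && !PySem.Set.contains A e.2.1)
       || (!PySem.Set.contains A e.1 && PySem.Set.contains A e.2.1)
    then acc + e.2.2 else acc) 0

-- fuel for the 'while improvement' loop: each improving pass strictly increases the integer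
-- cut weight, which stays between 0 and the sum of the positive weights, so this bound is
-- never reached; shared by both ports (it only makes the loops total)
def pvFuel (edges : List (Int × Int × Int)) : Nat :=
  1 + (edges.foldl (fun s (e : Int × Int × Int) => s + max e.2.2 0) 0).toNat

-- one 'for v in vertices' pass with break: first improving flip, if any
def pvScanA (edges : List (Int × Int × Int)) (vs : List Int) (A : PySem.Set Int) (maxw : Int) :
    Option (PySem.Set Int × Int) :=
  match vs with
  | [] => none
  | v :: rest =>
    let newA := PySem.Set.symmDiff A (PySem.Set.ofList [v])
    let nw := pvCutW edges newA
    if maxw < nw then some (newA, nw) else pvScanA edges rest A maxw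

def pvLoopA (edges : List (Int × Int × Int)) (vs : List Int) : Nat → PySem.Set Int → Int → Int
  | 0, _, maxw => maxw
  | fuel+1, A, maxw =>
    match pvScanA edges vs A maxw with
    | none => maxw
    | some (A', w') => pvLoopA edges vs fuel A' w'

def greedy_swapping_max_cut (edges : List (Int × Int × Int)) : Int :=
  let vs := pySetOrder (edges.flatMap (fun e => [e.1, e.2.1]))
  pvLoopA edges vs (pvFuel edges) PySem.Set.empty (pvCutW edges PySem.Set.empty)

-- ===== PORT B =====
-- inc = {v: [] for v in order}
def pvIncInit (vs : List Int) : PySem.Dict Int (List (Int × Int)) :=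
  vs.foldl (fun d v => d.insert v []) PySem.Dict.empty

-- for v1, v2, w in edges: inc[v1].append((v2, w)); inc[v2].append((v1, w))
def pvIncDict (edges : List (Int × Int × Int)) (vs : List Int) : PySem.Dict Int (List (Int × Int)) :=
  edges.foldl (fun d e =>
    (d.modify e.1 [] (fun l => l ++ [(e.2.1, e.2.2)])).modify e.2.1 [] (fun l => l ++ [(e.1, e.2.2)]))
    (pvIncInit vs)

-- gain of flipping v, summed over its incidence list (self-loops skipped)
def pvGain (inA : PySem.Dict Int Bool) (side : Bool) (v : Int) (incv : List (Int × Int)) : Int :=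
  incv.foldl (fun g p =>
    if p.1 = v then g
    else if inA.getD p.1 false = side then g + p.2 else g - p.2) 0

def pvScanB (inc : PySem.Dict Int (List (Int × Int))) (inA : PySem.Dict Int Bool) (vs : List Int)
    (cut : Int) : Option (PySem.Dict Int Bool × Int) :=
  match vs with
  | [] => none
  | v :: rest =>
    let side := inA.getD v false
    let g := pvGain inA side v (inc.getD v [])
    if 0 < g then some (inA.insert v (!side), cut + g) else pvScanB inc inA rest cut

def pvLoopB (inc : PySem.Dict Int (List (Int × Int))) (vs : List Int) :
    Nat → PySem.Dict Int Bool → Int → Int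
  | 0, _, cut => cut
  | fuel+1, inA, cut =>
    match pvScanB inc inA vs cut with
    | none => cut
    | some (inA', cut') => pvLoopB inc vs fuel inA' cut'

def greedy_swapping_max_cut_alt (edges : List (Int × Int × Int)) : Int :=
  let vs := pySetOrder (edges.flatMap (fun e => [e.1, e.2.1]))
  let inc := pvIncDict edges vs
  pvLoopB inc vs (pvFuel edges) (vs.foldl (fun d v => d.insert v false) PySem.Dict.empty) 0

-- ===== PRECONDITION & SPEC =====
def Spec_greedy_swapping_max_cut (edges : List (Int × Int × Int)) (out : Int) : Prop := out = greedy_swapping_max_cut_alt edges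
instance (edges : List (Int × Int × Int)) (out : Int) : Decidable (Spec_greedy_swapping_max_cut edges out) := by unfold Spec_greedy_swapping_max_cut; infer_instance

-- ===== CLAIM (what is proved, stated in full; the proofs are below) =====
def Claim_equal_greedy_swapping_max_cut : Prop := ∀ (edges : List (Int × Int × Int)), Dom_greedy_swapping_max_cut edges → Spec_greedy_swapping_max_cut edges (greedy_swapping_max_cut edges)

-- ===== LEMMAS AND PROOFS =====
def pvMem (A : PySem.Set Int) : Int → Bool := fun u => PySem.Set.contains A u

def pvCTerm (m : Int → Bool) (e : Int × Int × Int) : Int :=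
  if (m e.1 && !m e.2.1) || (!m e.1 && m e.2.1) then e.2.2 else 0

def pvDelta (m : Int → Bool) (v : Int) (e : Int × Int × Int) : Int :=
  if e.1 = v then (if e.2.1 = v then 0 else if m e.2.1 = m v then e.2.2 else -e.2.2)
  else if e.2.1 = v then (if m e.1 = m v then e.2.2 else -e.2.2)
  else 0

def pvContrib (v : Int) (e : Int × Int × Int) : List (Int × Int) :=
  (if e.1 = v then [(e.2.1, e.2.2)] else []) ++ (if e.2.1 = v then [(e.1, e.2.2)] else [])

def pvH (m : Int → Bool) (side : Bool) (v : Int) (p : Int × Int) : Int :=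
  if p.1 = v then 0 else if m p.1 = side then p.2 else -p.2

lemma pvCutW_sum (edges : List (Int × Int × Int)) (A : PySem.Set Int) :
    pvCutW edges A = (edges.map (pvCTerm (pvMem A))).sum := by
  have h : (fun (acc : Int) (e : Int × Int × Int) =>
      if (PySem.Set.contains A e.1 && !PySem.Set.contains A e.2.1)
         || (!PySem.Set.contains A e.1 && PySem.Set.contains A e.2.1)
      then acc + e.2.2 else acc) = fun acc e => acc + pvCTerm (pvMem A) e := by
    funext acc e; simp only [pvCTerm, pvMem]; split <;> simp
  rw [pvCutW, h, PySem.List.foldl_add]; simp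

lemma pvFlip_mem (A : PySem.Set Int) (v u : Int) :
    pvMem (PySem.Set.symmDiff A (PySem.Set.ofList [v])) u
      = if u = v then !(pvMem A u) else pvMem A u := by
  rw [Bool.eq_iff_iff]
  by_cases h : u = v <;>
    simp [pvMem, h, PySem.Set.mem_symmDiff, PySem.Set.ofList]

lemma pvCTerm_flip (m : Int → Bool) (v : Int) (e : Int × Int × Int) :
    pvCTerm (fun u => if u = v then !(m u) else m u) e = pvCTerm m e + pvDelta m v e := by
  obtain ⟨a, b, w⟩ := e
  by_cases ha : a = v <;> by_cases hb : b = v <;>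
    cases hma : m a <;> cases hmb : m b <;>
      simp_all [pvCTerm, pvDelta]

lemma pvCutW_flip (edges : List (Int × Int × Int)) (A : PySem.Set Int) (v : Int) :
    pvCutW edges (PySem.Set.symmDiff A (PySem.Set.ofList [v]))
      = pvCutW edges A + (edges.map (pvDelta (pvMem A) v)).sum := by
  rw [pvCutW_sum, pvCutW_sum]
  have hm : pvMem (PySem.Set.symmDiff A (PySem.Set.ofList [v]))
      = fun u => if u = v then !(pvMem A u) else pvMem A u := funext (pvFlip_mem A v)
  rw [hm]
  have hmap : edges.map (pvCTerm (fun u => if u = v then !(pvMem A u) else pvMem A u))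
      = edges.map (fun e => pvCTerm (pvMem A) e + pvDelta (pvMem A) v e) :=
    List.map_congr_left (fun e _ => pvCTerm_flip (pvMem A) v e)
  rw [hmap, PySem.List.sum_map_add_int]

lemma pvIncInit_getD (vs : List Int) (u : Int) : (pvIncInit vs).getD u [] = [] := by
  have h : ∀ (d : PySem.Dict Int (List (Int × Int))), (∀ x, d.getD x ([] : List (Int × Int)) = []) →
      ∀ x, (vs.foldl (fun d v => d.insert v []) d).getD x [] = [] := by
    induction vs with
    | nil => intro d hd x; exact hd x
    | cons v rest ih =>
      intro d hd x
      simp only [List.foldl_cons]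
      exact ih _ (fun y => by rw [PySem.Dict.getD_insert]; split <;> simp [hd]) x
  exact h PySem.Dict.empty (fun x => by simp [PySem.Dict.getD_empty]) u

lemma pvIncDict_getD (edges : List (Int × Int × Int)) (vs : List Int) (v : Int) :
    (pvIncDict edges vs).getD v [] = edges.flatMap (pvContrib v) := by
  have main : ∀ (d : PySem.Dict Int (List (Int × Int))),
      (edges.foldl (fun d e =>
        (d.modify e.1 [] (fun l => l ++ [(e.2.1, e.2.2)])).modify e.2.1 [] (fun l => l ++ [(e.1, e.2.2)])) d).getD v []
      = d.getD v [] ++ edges.flatMap (pvContrib v) := by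
    induction edges with
    | nil => intro d; simp
    | cons e rest ih =>
      intro d
      simp only [List.foldl_cons, List.flatMap_cons, ih]
      by_cases h1 : v = e.1 <;> by_cases h2 : v = e.2.1 <;>
        simp only [PySem.Dict.getD_modify, h1, h2, pvContrib, if_pos, eq_comm] <;>
        simp <;> split_ifs <;> simp_all [List.append_assoc]
  rw [pvIncDict, main, pvIncInit_getD]; simp

lemma pvGain_sum (inA : PySem.Dict Int Bool) (side : Bool) (v : Int) (L : List (Int × Int)) :
    pvGain inA side v L = (L.map (pvH (fun u => inA.getD u false) side v)).sum := by
  have h : (fun (g : Int) (p : Int × Int) =>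
      if p.1 = v then g
      else if inA.getD p.1 false = side then g + p.2 else g - p.2)
      = fun g p => g + pvH (fun u => inA.getD u false) side v p := by
    funext g p; simp only [pvH]; split_ifs <;> ring
  rw [pvGain, h, PySem.List.foldl_add]; simp

lemma pvContrib_sum (m : Int → Bool) (v : Int) (e : Int × Int × Int) :
    ((pvContrib v e).map (pvH m (m v) v)).sum = pvDelta m v e := by
  obtain ⟨a, b, w⟩ := e
  by_cases ha : a = v <;> by_cases hb : b = v <;>
    cases hma : m a <;> cases hmb : m b <;>
      simp_all [pvContrib, pvDelta, pvH]

lemma pvInAInit_getD (vs : List Int) (u : Int) :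
    ((vs.foldl (fun d v => d.insert v false) PySem.Dict.empty)).getD u false = false := by
  have h : ∀ (d : PySem.Dict Int Bool), (∀ x, d.getD x false = false) →
      ∀ x, (vs.foldl (fun d v => d.insert v false) d).getD x false = false := by
    induction vs with
    | nil => intro d hd x; exact hd x
    | cons v rest ih =>
      intro d hd x
      simp only [List.foldl_cons]
      exact ih _ (fun y => by rw [PySem.Dict.getD_insert]; split <;> simp [hd]) x
  exact h PySem.Dict.empty (fun x => by simp [PySem.Dict.getD_empty]) u

lemma pvCutW_empty (edges : List (Int × Int × Int)) : pvCutW edges PySem.Set.empty = 0 := by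
  have h : ∀ (a : Int), edges.foldl (fun acc e =>
      if (PySem.Set.contains PySem.Set.empty e.1 && !PySem.Set.contains PySem.Set.empty e.2.1)
         || (!PySem.Set.contains PySem.Set.empty e.1 && PySem.Set.contains PySem.Set.empty e.2.1)
      then acc + e.2.2 else acc) a = a := by
    induction edges with
    | nil => intro a; rfl
    | cons e rest ih => intro a; simp only [List.foldl_cons]; rw [if_neg (by simp [PySem.Set.empty])]; exact ih a
  exact h 0

-- the candidate's dict-computed gain IS the change of the full cut weight
lemma pvGain_eq_delta (edges : List (Int × Int × Int)) (vs : List Int)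
    (A : PySem.Set Int) (inA : PySem.Dict Int Bool) (v : Int)
    (hmem : ∀ u, pvMem A u = inA.getD u false) :
    pvCutW edges (PySem.Set.symmDiff A (PySem.Set.ofList [v]))
      = pvCutW edges A + pvGain inA (inA.getD v false) v ((pvIncDict edges vs).getD v []) := by
  have hfun : (fun u => inA.getD u false) = pvMem A := funext (fun u => (hmem u).symm)
  rw [pvGain_sum, pvIncDict_getD, hfun, ← hmem v, pvCutW_flip]
  congr 1
  rw [List.map_flatMap]
  induction edges with
  | nil => rfl
  | cons e rest ih =>
    simp only [List.flatMap_cons, List.map_cons, List.sum_cons, List.sum_append, ih,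
      pvContrib_sum]

lemma pvScan_eq (edges : List (Int × Int × Int)) (vs : List Int)
    (A : PySem.Set Int) (inA : PySem.Dict Int Bool) (maxw : Int)
    (hmem : ∀ u, pvMem A u = inA.getD u false) (hw : maxw = pvCutW edges A) :
    ∀ (vs' : List Int),
    (pvScanA edges vs' A maxw = none ∧ pvScanB (pvIncDict edges vs) inA vs' maxw = none) ∨
    (∃ A' inA' w, pvScanA edges vs' A maxw = some (A', w)
      ∧ pvScanB (pvIncDict edges vs) inA vs' maxw = some (inA', w)
      ∧ (∀ u, pvMem A' u = inA'.getD u false) ∧ w = pvCutW edges A') := by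
  intro vs'
  induction vs' with
  | nil => exact Or.inl ⟨rfl, rfl⟩
  | cons v rest ih =>
    have hg := pvGain_eq_delta edges vs A inA v hmem
    by_cases himp : 0 < pvGain inA (inA.getD v false) v ((pvIncDict edges vs).getD v [])
    · refine Or.inr ⟨PySem.Set.symmDiff A (PySem.Set.ofList [v]),
        inA.insert v (!(inA.getD v false)),
        pvCutW edges (PySem.Set.symmDiff A (PySem.Set.ofList [v])), ?_, ?_, ?_, rfl⟩
      · simp only [pvScanA]
        rw [if_pos (by omega)]
      · simp only [pvScanB]
        rw [if_pos himp]
        rw [hg, hw]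
      · intro u
        rw [pvFlip_mem, PySem.Dict.getD_insert]
        split
        · next h => rw [h, hmem]
        · exact hmem u
    · have hA : pvScanA edges (v :: rest) A maxw = pvScanA edges rest A maxw := by
        simp only [pvScanA]
        rw [if_neg (by omega)]
      have hB : pvScanB (pvIncDict edges vs) inA (v :: rest) maxw
          = pvScanB (pvIncDict edges vs) inA rest maxw := by
        simp only [pvScanB]
        rw [if_neg himp]
      rw [hA, hB]
      exact ih

lemma pvLoop_eq (edges : List (Int × Int × Int)) (vs vs' : List Int) :
    ∀ (fuel : Nat) (A : PySem.Set Int) (inA : PySem.Dict Int Bool) (maxw : Int),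
    (∀ u, pvMem A u = inA.getD u false) → maxw = pvCutW edges A →
    pvLoopA edges vs' fuel A maxw = pvLoopB (pvIncDict edges vs) vs' fuel inA maxw := by
  intro fuel
  induction fuel with
  | zero => intro A inA maxw _ _; rfl
  | succ f ih =>
    intro A inA maxw hmem hw
    rcases pvScan_eq edges vs A inA maxw hmem hw vs' with ⟨hA, hB⟩ | ⟨A', inA', w, hA, hB, hmem', hw'⟩
    · simp only [pvLoopA, pvLoopB, hA, hB]
    · simp only [pvLoopA, pvLoopB, hA, hB]
      exact ih A' inA' w hmem' hw'

-- ===== VERDICT (by name: the statement is the Claim_ definition above) =====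
theorem greedy_swapping_max_cut_spec : Claim_equal_greedy_swapping_max_cut := by
  intro edges _
  unfold Spec_greedy_swapping_max_cut greedy_swapping_max_cut greedy_swapping_max_cut_alt
  simp only [pvCutW_empty]
  exact pvLoop_eq edges _ _ (pvFuel edges) PySem.Set.empty _ _
    (fun u => by rw [pvInAInit_getD]; simp [pvMem, PySem.Set.empty])
    (pvCutW_empty edges).symm
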